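-- pv_equiv track=rewrite | github.com/ericmerle3789/Collatz-Junction-Theorem | research_log/R159_character_sums.py | compute_H
-- ===== SOURCE A (Python) =====
-- def ord_p_2(p):
--     """Compute ord_p(2) = smallest r such that 2^r = 1 mod p."""
--     r = 1
--     val = 2 % p
--     while val != 1:
--         val = (val * 2) % p
--         r += 1
--         if r > p:
--             return p - 1  # fallback
--     return r
--
-- def compute_H(p):
--     """Compute H = <2> in (Z/pZ)* as a list of elements."""
--     H = []
--     val = 1
--     r = ord_p_2(p)
--     for _ in range(r):
--         H.append(val)
--         val = (val * 2) % p
--     return H, r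
-- ===== SOURCE B (Python) =====
-- def compute_H(p):
--     """Compute H = <2> in (Z/pZ)* as a list of elements."""
--     H = [1]
--     val = 2 % p
--     while val != 1:
--         H.append(val)
--         val = (val * 2) % p
--         if len(H) > p:
--             return H[:p - 1], p - 1
--     return H, len(H)
-- ===== Notes on version B (the rewrite author's own statement) =====
-- stated objective: simpler
-- what changed: B walks the subgroup once, building H and deriving r from its length, instead of first computing the order with ord_p_2 and then re-walking the same powers of 2 in a second loop.
import Mathlib
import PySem

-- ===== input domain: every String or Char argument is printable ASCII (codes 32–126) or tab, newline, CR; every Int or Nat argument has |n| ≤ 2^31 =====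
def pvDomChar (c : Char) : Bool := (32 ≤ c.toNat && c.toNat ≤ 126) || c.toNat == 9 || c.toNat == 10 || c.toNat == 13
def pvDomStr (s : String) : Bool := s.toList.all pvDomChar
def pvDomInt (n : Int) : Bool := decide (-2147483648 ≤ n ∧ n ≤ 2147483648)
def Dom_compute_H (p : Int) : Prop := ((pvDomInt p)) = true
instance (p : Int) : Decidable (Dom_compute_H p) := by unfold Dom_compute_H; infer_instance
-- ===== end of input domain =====

-- B builds H in a single walk of the subgroup and derives r from H's length,
-- replacing A's two passes (ord_p_2 followed by a rebuild of the same powers). Objective: simpler.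

-- ===== PORT A =====
-- the while loop of ord_p_2: state (val, r)
def ordLoop (p val r : Int) : Int :=
  if val = 1 then r
  else
    let val' := PySem.Int.mod (val * 2) p
    let r' := r + 1
    if r' > p then p - 1
    else ordLoop p val' r'
termination_by (p - r).toNat
decreasing_by omega

def ord_p_2 (p : Int) : Int := ordLoop p (PySem.Int.mod 2 p) 1

def compute_H (p : Int) : List Int × Int :=
  let r := ord_p_2 p
  let st := (PySem.List.pyRange 0 r 1).foldl
    (fun (st : List Int × Int) _ => (st.1 ++ [st.2], PySem.Int.mod (st.2 * 2) p))
    (([] : List Int), (1 : Int))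
  (st.1, r)

-- ===== PORT B =====
-- the while loop of B: state (H, val)
def altLoop (p : Int) (H : List Int) (val : Int) : List Int × Int :=
  if val = 1 then (H, (H.length : Int))
  else
    let H' := H ++ [val]
    let val' := PySem.Int.mod (val * 2) p
    if ((H'.length : Int)) > p then (PySem.List.slice H' none (some (p - 1)), p - 1)
    else altLoop p H' val'
termination_by (p - H.length).toNat
decreasing_by simp only [H', List.length_append, List.length_singleton] at *; omega

def compute_H_alt (p : Int) : List Int × Int :=
  altLoop p [1] (PySem.Int.mod 2 p)

-- ===== PRECONDITION & SPEC =====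
-- p = 0 makes '2 % p' raise ZeroDivisionError in Python; everywhere else A returns.
def Pre_compute_H (p : Int) : Prop := p ≠ 0
instance (p : Int) : Decidable (Pre_compute_H p) := by unfold Pre_compute_H; infer_instance
def pvWitness_compute_H : Int := (7)

def Spec_compute_H (p : Int) (out : List Int × Int) : Prop := out = compute_H_alt p
instance (p : Int) (out : List Int × Int) : Decidable (Spec_compute_H p out) := by unfold Spec_compute_H; infer_instance

-- ===== CLAIM (what is proved, stated in full; the proofs are below) =====
def Claim_equal_compute_H : Prop := ∀ (p : Int), Dom_compute_H p → Pre_compute_H p → Spec_compute_H p (compute_H p)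

-- ===== LEMMAS AND PROOFS =====

-- the successive powers of 2 mod p, as A's and B's loops both generate them
def pw (p : Int) : Nat → Int
  | 0 => 1
  | k + 1 => PySem.Int.mod (pw p k * 2) p

-- A's rebuild loop produces exactly the first n powers
lemma foldA (p : Int) (n : Nat) :
    (PySem.List.pyRange 0 (n : Int) 1).foldl
      (fun (st : List Int × Int) _ => (st.1 ++ [st.2], PySem.Int.mod (st.2 * 2) p))
      (([] : List Int), (1 : Int))
    = ((List.range n).map (pw p), pw p n) := by
  induction n with
  | zero => simp [PySem.List.pyRange_one_eq_nil, pw]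
  | succ n ih =>
      have hc : ((n + 1 : Nat) : Int) = ((n : Int) + 1) := by push_cast; ring
      rw [hc, PySem.List.pyRange_one_succ_right (by omega)]
      rw [List.foldl_append, ih]
      simp [List.range_succ, pw]

lemma foldA_int (p r : Int) :
    (PySem.List.pyRange 0 r 1).foldl
      (fun (st : List Int × Int) _ => (st.1 ++ [st.2], PySem.Int.mod (st.2 * 2) p))
      (([] : List Int), (1 : Int))
    = ((List.range r.toNat).map (pw p), pw p r.toNat) := by
  by_cases h : 0 ≤ r
  · obtain ⟨n, rfl⟩ : ∃ n : Nat, r = (n : Int) := ⟨r.toNat, by omega⟩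
    simpa using foldA p n
  · rw [PySem.List.pyRange_one_eq_nil (by omega)]
    have : r.toNat = 0 := by omega
    simp [this, pw]

-- the slice taken in B's fallback branch is exactly the first (p-1) powers
lemma fallback_slice (p : Int) (hp : p ≠ 0) (k : Nat) (hk1 : 1 ≤ k)
    (hkp : (k : Int) ≤ p ∨ k = 1) (hcap : p < (k : Int) + 1) :
    PySem.List.slice ((List.range (k + 1)).map (pw p)) none (some (p - 1))
      = (List.range (p - 1).toNat).map (pw p) := by
  rcases hkp with hle | h1
  · have hpk : p = (k : Int) := by omega
    subst hpk
    rw [PySem.List.slice_to _ (by omega)]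
    have h : ((k : Int) - 1).toNat = k - 1 := by omega
    rw [h, ← List.map_take, List.take_range]
    congr 2
    omega
  · subst h1
    -- k = 1 and p ≤ 1, p ≠ 0 : the slice is empty, as is range (p-1).toNat
    have hzero : (p - 1).toNat = 0 := by omega
    rw [hzero]
    simp only [List.range_zero, List.map_nil]
    rcases lt_trichotomy p 0 with hneg | hz | hpos
    · simp only [PySem.List.slice, PySem.List.clampIdx]
      have hlen : (((List.range (1 + 1)).map (pw p)).length : Int) = 2 := by simp
      split_ifs <;> simp_all
      omega
    · exact absurd hz hp
    · have h : p = 1 := by omega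
      subst h
      rw [PySem.List.slice_to _ (by omega)]
      simp

-- one synchronized step of the two loops
lemma loops_step (p : Int) (hp : p ≠ 0) (k : Nat) (hk1 : 1 ≤ k) (hkp : (k : Int) ≤ p ∨ k = 1)
    (hrec : (k : Int) + 1 ≤ p →
      altLoop p ((List.range (k + 1)).map (pw p)) (pw p (k + 1))
        = ((List.range (ordLoop p (pw p (k + 1)) ((k + 1 : Nat) : Int)).toNat).map (pw p),
           ordLoop p (pw p (k + 1)) ((k + 1 : Nat) : Int))) :
    altLoop p ((List.range k).map (pw p)) (pw p k)
      = ((List.range (ordLoop p (pw p k) (k : Int)).toNat).map (pw p), ordLoop p (pw p k) (k : Int)) := by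
  rw [ordLoop.eq_def, altLoop.eq_def]
  by_cases hv : pw p k = 1
  · simp [hv]
  · simp only [if_neg hv, List.length_append, List.length_map, List.length_range,
      List.length_singleton, Nat.cast_add, Nat.cast_one]
    have hH : (List.range k).map (pw p) ++ [pw p k] = (List.range (k + 1)).map (pw p) := by
      simp [List.range_succ]
    have hval : PySem.Int.mod (pw p k * 2) p = pw p (k + 1) := rfl
    by_cases hcap : ((k : Int) + 1) > p
    · rw [if_pos hcap, if_pos hcap, hH]
      exact Prod.ext (fallback_slice p hp k hk1 hkp (by omega)) rfl
    · rw [if_neg hcap, if_neg hcap, hH, hval]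
      have hc : ((k : Int) + 1) = ((k + 1 : Nat) : Int) := by push_cast; ring
      rw [hc]
      exact hrec (by omega)

-- the two loops walk the same states: B's loop computes A's order and A's list at once
lemma altLoop_eq (p : Int) (hp : p ≠ 0) :
    ∀ (n k : Nat), 1 ≤ k → ((k : Int) ≤ p ∨ k = 1) → (p - k).toNat ≤ n →
    altLoop p ((List.range k).map (pw p)) (pw p k)
      = ((List.range (ordLoop p (pw p k) k).toNat).map (pw p), ordLoop p (pw p k) k) := by
  intro n
  induction n with
  | zero =>
      intro k hk1 hkp hb
      exact loops_step p hp k hk1 hkp (fun h => absurd hb (by omega))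
  | succ n ih =>
      intro k hk1 hkp hb
      exact loops_step p hp k hk1 hkp
        (fun h => ih (k + 1) (by omega) (Or.inl (by exact_mod_cast h)) (by omega))

-- ===== VERDICT (by name: the statement is the Claim_ definition above) =====
theorem compute_H_spec : Claim_equal_compute_H := by
  intro p _ hp
  unfold Spec_compute_H compute_H compute_H_alt ord_p_2
  have h1 : [(1 : Int)] = (List.range 1).map (pw p) := by simp [pw]
  have h2 : PySem.Int.mod 2 p = pw p 1 := by simp [pw]
  rw [h1, h2]
  rw [altLoop_eq p hp ((p - 1).toNat) 1 (by omega) (Or.inr rfl) (le_refl _)]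
  simp only [foldA_int]
  norm_cast
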